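-- pv_equiv track=rewrite | github.com/leonkong-1/gb-railways-real-time-performance | aggregation.py | _compute_cancelled
-- ===== SOURCE A (Python) =====
-- def _compute_cancelled(messages: list[dict]) -> bool:
--     """
--     Track most-recent event type between 0002 and 0005 for this train_id.
--     Returns True if the most recent of those two types is a 0002 (cancellation).
--     """
--     latest_ts = ""
--     latest_is_cancelled = False
--     for m in messages:
--         mt = m.get("msg_type")
--         if mt not in ("0002", "0005"):
--             continue
--         ts = m.get("received_at", "")
--         if ts >= latest_ts:
--             latest_ts = ts
--             latest_is_cancelled = mt == "0002"
--     return latest_is_cancelled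
-- ===== SOURCE B (Python) =====
-- def _compute_cancelled(messages: list[dict]) -> bool:
--     """
--     Returns True if the most recent 0002/0005 event is a 0002 (cancellation).
--     Stable-sort the relevant messages by received_at and look at the last
--     element: stability means equal timestamps keep input order, so the last
--     element of the sorted list is exactly the last-wins (>=) latest message.
--     """
--     rel = sorted(
--         (m for m in messages if m.get("msg_type") in ("0002", "0005")),
--         key=lambda m: m.get("received_at", ""),
--     )
--     return bool(rel) and rel[-1].get("msg_type") == "0002"
-- ===== Notes on version B (the rewrite author's own statement) =====
-- stated objective: alternative
-- what changed: Replaces A's single-pass fold tracking (latest_ts, latest_is_cancelled) with a sort-based algorithm: stable-sort the relevant 0002/0005 messages by received_at and test the last element of the sorted list (stability makes equal timestamps keep input order, reproducing A's >= last-wins rule).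
import Mathlib
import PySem

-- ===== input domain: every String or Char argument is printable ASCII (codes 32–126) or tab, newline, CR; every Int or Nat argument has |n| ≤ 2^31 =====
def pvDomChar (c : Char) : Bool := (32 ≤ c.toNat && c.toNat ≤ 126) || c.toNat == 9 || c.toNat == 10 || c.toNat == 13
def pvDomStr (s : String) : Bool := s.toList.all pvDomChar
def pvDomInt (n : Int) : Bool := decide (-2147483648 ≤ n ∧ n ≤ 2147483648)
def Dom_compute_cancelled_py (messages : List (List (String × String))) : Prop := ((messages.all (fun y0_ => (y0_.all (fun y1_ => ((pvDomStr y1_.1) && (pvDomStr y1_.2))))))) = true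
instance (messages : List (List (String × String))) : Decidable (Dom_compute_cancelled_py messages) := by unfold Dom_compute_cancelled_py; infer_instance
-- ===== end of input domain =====

-- B replaces A's single-pass stateful scan with stable-sort-by-timestamp then take the last element (different algorithm; not faster: O(n log n) vs O(n)).
-- ===== PORT A =====
-- One fold keeping (latest_ts, latest_is_cancelled), last-wins on ts ties (>=), as in A.
def compute_cancelled_py (messages : List (List (String × String))) : Bool :=
  (messages.foldl
    (fun (st : String × Bool) m =>
      let mt := List.lookup "msg_type" m
      if mt == some "0002" || mt == some "0005" then
        let ts := (List.lookup "received_at" m).getD ""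
        if st.1 ≤ ts then (ts, mt == some "0002") else st
      else st)
    ("", false)).2

-- ===== PORT B =====
-- Stable sort of the relevant messages by received_at; the last element of the
-- sorted list (rel[-1]) is the latest message (stability gives the last-wins tie
-- rule); empty sorted list (bool(rel) false) gives false.
def compute_cancelled_py_alt (messages : List (List (String × String))) : Bool :=
  let rel := PySem.List.sorted
    (messages.filter (fun m =>
      List.lookup "msg_type" m == some "0002" || List.lookup "msg_type" m == some "0005"))
    (fun m => (List.lookup "received_at" m).getD "")
  match rel.getLast? with
  | none => false
  | some last => List.lookup "msg_type" last == some "0002"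

-- ===== PRECONDITION & SPEC =====
def Spec_compute_cancelled_py (messages : List (List (String × String))) (out : Bool) : Prop := out = compute_cancelled_py_alt messages
instance (messages : List (List (String × String))) (out : Bool) : Decidable (Spec_compute_cancelled_py messages out) := by unfold Spec_compute_cancelled_py; infer_instance

-- ===== CLAIM (what is proved, stated in full; the proofs are below) =====
def Claim_equal_compute_cancelled_py : Prop := ∀ (messages : List (List (String × String))), Dom_compute_cancelled_py messages → Spec_compute_cancelled_py messages (compute_cancelled_py messages)

-- ===== LEMMAS AND PROOFS =====

-- abbreviations for the proofs only
def pvKey (m : List (String × String)) : String := (List.lookup "received_at" m).getD ""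
def pvIsC (m : List (String × String)) : Bool := List.lookup "msg_type" m == some "0002"
def pvPick (c m : List (String × String)) : List (String × String) :=
  if pvKey c ≤ pvKey m then m else c

theorem pv_foldl_step (rs : List (List (String × String))) (c : List (String × String)) :
    rs.foldl (fun (st : String × Bool) m =>
      if st.1 ≤ pvKey m then (pvKey m, pvIsC m) else st) (pvKey c, pvIsC c)
    = (pvKey (rs.foldl pvPick c), pvIsC (rs.foldl pvPick c)) := by
  induction rs generalizing c with
  | nil => rfl
  | cons m rs ih =>
    rw [List.foldl_cons, List.foldl_cons]
    by_cases h : pvKey c ≤ pvKey m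
    · simp only [pvPick, h, if_true]
      exact ih m
    · simp only [pvPick, h, if_false]
      exact ih c

theorem pv_empty_le (s : String) : "" ≤ s := by
  rw [String.le_iff_toList_le]
  show ("".toList) ≤ s.toList
  simp only [String.toList_empty]
  cases h : s.toList with
  | nil => exact le_refl _
  | cons a t => exact le_of_lt (List.Lex.nil)

theorem pv_A_filter (l : List (List (String × String))) (st : String × Bool) :
    l.foldl (fun (st : String × Bool) m =>
      let mt := List.lookup "msg_type" m
      if mt == some "0002" || mt == some "0005" then
        let ts := (List.lookup "received_at" m).getD ""
        if st.1 ≤ ts then (ts, mt == some "0002") else st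
      else st) st
    = (l.filter (fun m =>
        List.lookup "msg_type" m == some "0002" || List.lookup "msg_type" m == some "0005")).foldl
        (fun (st : String × Bool) m => if st.1 ≤ pvKey m then (pvKey m, pvIsC m) else st) st := by
  induction l generalizing st with
  | nil => rfl
  | cons m l ih =>
    rw [List.foldl_cons, List.filter_cons]
    by_cases h : (List.lookup "msg_type" m == some "0002"
        || List.lookup "msg_type" m == some "0005") = true
    · simp only [h, if_true, List.foldl_cons, ih, pvKey, pvIsC]
    · simp only [h, if_false, ih, Bool.false_eq_true]

-- last element of a stable insertion into a key-sorted list = the last-wins pick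
theorem pv_insertBy_getLast (acc : List (List (String × String))) (x c : List (String × String))
    (hs : acc.Pairwise (fun a b => pvKey a ≤ pvKey b))
    (hl : acc.getLast? = some c) :
    (PySem.List.insertBy (fun a b => decide (pvKey a < pvKey b)) x acc).getLast?
      = some (pvPick c x) := by
  induction acc generalizing c with
  | nil => simp at hl
  | cons y ys ih =>
    simp only [PySem.List.insertBy]
    by_cases hb : pvKey x < pvKey y
    · simp only [hb, decide_true, if_true]
      -- x goes first; last element unchanged = c, and pvKey c ≥ pvKey y > pvKey x
      have hcm : c ∈ y :: ys := List.mem_of_getLast? hl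
      have hyc : pvKey y ≤ pvKey c := by
        rcases List.mem_cons.mp hcm with rfl | hc
        · exact le_refl _
        · exact (List.pairwise_cons.mp hs).1 c hc
      have : ¬ pvKey c ≤ pvKey x := by
        intro h; exact absurd (lt_of_lt_of_le hb (le_trans hyc h)) (lt_irrefl _)
      simp only [pvPick, this, if_false]
      show (x :: y :: ys).getLast? = some c
      rw [List.getLast?_cons_cons]
      exact hl
    · simp only [hb, decide_false, Bool.false_eq_true, if_false]
      cases ys with
      | nil =>
        -- c = y, insertBy x [] = [x]; result last = x and pvKey y ≤ pvKey x
        have hc : y = c := by simpa using hl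
        subst hc
        have hle : pvKey y ≤ pvKey x := not_lt.mp hb
        simp [PySem.List.insertBy, pvPick, hle]
      | cons z zs =>
        have hl' : (z :: zs).getLast? = some c := by
          rw [List.getLast?_cons_cons] at hl; exact hl
        have ih' := ih c (List.pairwise_cons.mp hs).2 hl'
        cases hI : PySem.List.insertBy (fun a b => decide (pvKey a < pvKey b)) x (z :: zs) with
        | nil => rw [hI] at ih'; simp at ih'
        | cons w ws =>
          rw [hI] at ih'
          rw [List.getLast?_cons_cons]
          exact ih'

-- last of sorted(m0 :: rs, key) = last-wins fold over rs starting at m0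
theorem pv_sorted_getLast (rs : List (List (String × String))) (m0 : List (String × String)) :
    (PySem.List.sorted (m0 :: rs) pvKey).getLast? = some (rs.foldl pvPick m0) := by
  induction rs using List.reverseRecOn with
  | nil => rfl
  | append_singleton t x ih =>
    have h1 : PySem.List.sorted (m0 :: (t ++ [x])) pvKey
        = PySem.List.insertBy (fun a b => decide (pvKey a < pvKey b)) x
            (PySem.List.sorted (m0 :: t) pvKey) := by
      rw [show m0 :: (t ++ [x]) = (m0 :: t) ++ [x] from rfl,
          PySem.List.sorted_eq_foldl_insertBy, PySem.List.sorted_eq_foldl_insertBy,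
          List.foldl_append]
      rfl
    rw [h1, pv_insertBy_getLast _ x _ (PySem.List.sorted_pairwise _ _) ih,
        List.foldl_append]
    rfl

-- ===== VERDICT (by name: the statement is the Claim_ definition above) =====
theorem compute_cancelled_py_spec : Claim_equal_compute_cancelled_py := by
  intro messages _
  unfold Spec_compute_cancelled_py compute_cancelled_py compute_cancelled_py_alt
  rw [pv_A_filter]
  cases hrel : messages.filter (fun m =>
      List.lookup "msg_type" m == some "0002" || List.lookup "msg_type" m == some "0005") with
  | nil => rfl
  | cons m0 rs =>
    have h0 : (("" : String), false).1 ≤ pvKey m0 := pv_empty_le _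
    rw [List.foldl_cons, if_pos h0]
    show (rs.foldl (fun (st : String × Bool) m =>
        if st.1 ≤ pvKey m then (pvKey m, pvIsC m) else st) (pvKey m0, pvIsC m0)).2
      = _
    rw [pv_foldl_step]
    show pvIsC (rs.foldl pvPick m0)
      = (match (PySem.List.sorted (m0 :: rs) pvKey).getLast? with
         | none => false
         | some last => List.lookup "msg_type" last == some "0002")
    rw [pv_sorted_getLast]
    rfl
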